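-- pv_equiv track=rewrite | github.com/rmorriscpux/daily-coding-challenges | 281-300/challenge_293.py | createPyramid
-- ===== SOURCE A (Python) =====
-- def createPyramid(stones: list[int]) -> tuple[int, list[int]]:
--     # Pyramid length will wind up being an odd number less than or equal to the length of the input list.
--     pyramid_length = len(stones)
--     if pyramid_length % 2 == 0:
--         pyramid_length -= 1
--     # Default output.
--     final_pyramid = [0] * len(stones)
--     moves = -1
--
--     while pyramid_length > 0 and moves == -1:
--         # Peak height is length divided by 2 rounded up. Make pyramid list going from 1 to peak height and back down.
--         peak_height = pyramid_length // 2 + 1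
--         pyramid = [i for i in range(1, peak_height)] + [j for j in range(peak_height, 0, -1)]
--
--         # Check that the pyramid height is not higher than each stone starting from left or right.
--         for offset in [0, len(stones) - pyramid_length]:
--             is_valid = True
--             for i, num in enumerate(pyramid):
--                 if num > stones[i + offset]:
--                     is_valid = False
--                     break
--
--             if is_valid:
--                 # When a valid pyramid is found, construct the output based on the offset and calculate the moves it takes to make the valid pyramid.
--                 # Loop will end when this is accomplished.
--                 final_pyramid = ([0] * offset) + pyramid + ([0] * (len(stones) - offset - pyramid_length))
--                 moves = sum(stones) - sum(pyramid)
--                 break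
--
--         pyramid_length -= 2
--
--     return moves, final_pyramid
-- ===== SOURCE B (Python) =====
-- def createPyramid(stones: list[int]) -> tuple[int, list[int]]:
--     n = len(stones)
--
--     def fits(L, offset):
--         # pyramid of length L has height min(i+1, L-i) at position i
--         return all(min(i + 1, L - i) <= stones[i + offset] for i in range(L))
--
--     def max_k(left):
--         # largest k in [0, (n+1)//2] such that k == 0 or the length-(2k-1)
--         # pyramid fits on that side; feasibility is monotone in k, so binary search
--         lo, hi = 0, (n + 1) // 2
--         while lo < hi:
--             mid = (lo + hi + 1) // 2
--             L = 2 * mid - 1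
--             if fits(L, 0 if left else n - L):
--                 lo = mid
--             else:
--                 hi = mid - 1
--         return lo
--
--     kl = max_k(True)
--     kr = max_k(False)
--     k = max(kl, kr)
--     if k == 0:
--         return -1, [0] * n
--     L = 2 * k - 1
--     offset = 0 if kl >= kr else n - L
--     pyramid = [min(i + 1, L - i) for i in range(L)]
--     return sum(stones) - k * k, [0] * offset + pyramid + [0] * (n - offset - L)
-- ===== Notes on version B (the rewrite author's own statement) =====
-- stated objective: faster
-- what changed: Replaces A's descending O(n^2) scan over candidate pyramid lengths by two O(n log n) binary searches (fitting a left/right-aligned pyramid is monotone in its length), a closed-form pyramid cell min(i+1, L-i) instead of concatenated ranges, and moves = sum(stones) - k*k in closed form.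
-- outside the precondition, e.g. on createPyramid([1, 3, 2, -3]): A returns (2, [1, 0, 0, 0]), B returns (-1, [1, 2, 1, 0])
import Mathlib
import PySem

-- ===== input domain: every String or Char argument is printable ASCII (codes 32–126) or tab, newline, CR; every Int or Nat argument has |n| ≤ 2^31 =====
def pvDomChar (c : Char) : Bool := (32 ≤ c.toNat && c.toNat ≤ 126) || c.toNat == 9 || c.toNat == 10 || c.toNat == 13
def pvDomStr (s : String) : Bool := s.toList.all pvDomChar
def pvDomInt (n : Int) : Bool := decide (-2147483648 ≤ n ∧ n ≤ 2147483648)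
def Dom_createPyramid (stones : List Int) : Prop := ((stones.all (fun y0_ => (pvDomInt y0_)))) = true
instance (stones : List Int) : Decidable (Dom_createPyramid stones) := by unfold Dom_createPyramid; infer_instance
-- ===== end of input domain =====

-- B replaces A's descending O(n^2) scan over pyramid lengths by two binary searches over
-- the (monotone) fitting length per side plus a closed-form reconstruction; measured faster.


-- ===== PORT A =====

-- pyramid = [i for i in range(1, peak)] + [j for j in range(peak, 0, -1)], peak = L//2 + 1
def pvPyrA (L : Int) : List Int :=
  PySem.List.pyRange 1 (PySem.Int.floordiv L 2 + 1) 1 ++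
    PySem.List.pyRange (PySem.Int.floordiv L 2 + 1) 0 (-1)

-- the inner 'for i, num in enumerate(pyramid): if num > stones[i+offset]: is_valid = False; break'
-- (indices are provably in range wherever A evaluates this, so pyGet? … .getD 0 is exact here)
def pvValidA (stones pyr : List Int) (offset : Int) : Bool :=
  (PySem.List.enumerate pyr).all
    (fun p => !(decide ((PySem.List.pyGet? stones (p.1 + offset)).getD 0 < p.2)))

-- final_pyramid = [0]*offset + pyramid + [0]*(len(stones)-offset-pyramid_length)
def pvFinalA (stones pyr : List Int) (offset L : Int) : List Int :=
  List.replicate offset.toNat 0 ++ pyr ++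
    List.replicate ((stones.length : Int) - offset - L).toNat 0

-- the while loop: state (pyramid_length, moves, final_pyramid).
-- 'fuel' is only a structural totality guard: stones.length + 1 provably exceeds the
-- number of iterations, so the 0-fuel branch is never reached from createPyramid.
def pvLoopA (stones : List Int) (fuel : Nat) (L moves : Int) (finalPyr : List Int) :
    Int × List Int :=
  match fuel with
  | 0 => (moves, finalPyr)
  | fuel + 1 =>
    if 0 < L ∧ moves = -1 then
      let pyr := pvPyrA L
      if pvValidA stones pyr 0 then
        pvLoopA stones fuel (L - 2) (stones.sum - pyr.sum) (pvFinalA stones pyr 0 L)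
      else if pvValidA stones pyr ((stones.length : Int) - L) then
        pvLoopA stones fuel (L - 2) (stones.sum - pyr.sum)
          (pvFinalA stones pyr ((stones.length : Int) - L) L)
      else
        pvLoopA stones fuel (L - 2) moves finalPyr
    else (moves, finalPyr)

def createPyramid (stones : List Int) : Int × List Int :=
  let n : Int := stones.length
  let L0 : Int := if PySem.Int.mod n 2 = 0 then n - 1 else n
  pvLoopA stones (stones.length + 1) L0 (-1) (List.replicate stones.length 0)

-- ===== PORT B =====
-- fits(L, offset) = all(min(i+1, L-i) <= stones[i+offset] for i in range(L))
-- (indices are provably in range wherever B evaluates this, so pyGet? … .getD 0 is exact here)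
def pvFitsB (stones : List Int) (L offset : Int) : Bool :=
  (PySem.List.pyRange 0 L 1).all
    (fun i => decide (min (i + 1) (L - i) ≤ (PySem.List.pyGet? stones (i + offset)).getD 0))

-- the binary-search loop of max_k.  'fuel' is only a structural totality guard:
-- stones.length + 1 provably exceeds the number of iterations.
def pvMaxK (stones : List Int) (left : Bool) (fuel : Nat) (lo hi : Int) : Int :=
  match fuel with
  | 0 => lo
  | fuel + 1 =>
    if lo < hi then
      let mid := PySem.Int.floordiv (lo + hi + 1) 2
      let L := 2 * mid - 1
      if pvFitsB stones L (if left then 0 else (stones.length : Int) - L) then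
        pvMaxK stones left fuel mid hi
      else
        pvMaxK stones left fuel lo (mid - 1)
    else lo

def createPyramid_alt (stones : List Int) : Int × List Int :=
  let n : Int := stones.length
  let kl := pvMaxK stones true (stones.length + 1) 0 (PySem.Int.floordiv (n + 1) 2)
  let kr := pvMaxK stones false (stones.length + 1) 0 (PySem.Int.floordiv (n + 1) 2)
  let k := max kl kr
  if k = 0 then (-1, List.replicate stones.length 0)
  else
    let L := 2 * k - 1
    let offset := if kr ≤ kl then 0 else n - L
    let pyr := (PySem.List.pyRange 0 L 1).map (fun i => min (i + 1) (L - i))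
    (stones.sum - k * k,
      List.replicate offset.toNat 0 ++ pyr ++ List.replicate (n - offset - L).toNat 0)

-- ===== PRECONDITION & SPEC =====
-- Pre_ restricts to the natural domain of nonnegative stone heights: on lists containing a
-- negative stone, A's 'moves == -1' sentinel can collide with a legitimate move count, so A
-- discards a pyramid it already found and keeps searching.
def Pre_createPyramid (stones : List Int) : Prop := ∀ x ∈ stones, 0 ≤ x
instance (stones : List Int) : Decidable (Pre_createPyramid stones) := by unfold Pre_createPyramid; infer_instance
def pvWitness_createPyramid : List Int := [2, 3, 1]

def Spec_createPyramid (stones : List Int) (out : Int × List Int) : Prop := out = createPyramid_alt stones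
instance (stones : List Int) (out : Int × List Int) : Decidable (Spec_createPyramid stones out) := by unfold Spec_createPyramid; infer_instance

-- ===== CLAIM (what is proved, stated in full; the proofs are below) =====
def Claim_equal_createPyramid : Prop := ∀ (stones : List Int), Dom_createPyramid stones → Pre_createPyramid stones → Spec_createPyramid stones (createPyramid stones)

-- ===== LEMMAS AND PROOFS =====

def pvFeas (stones : List Int) (left : Bool) (k : Int) : Bool :=
  pvFitsB stones (2 * k - 1) (if left then 0 else (stones.length : Int) - (2 * k - 1))

lemma fitsB_iff (stones : List Int) (L off : Int) :
    pvFitsB stones L off = true ↔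
      ∀ i : Int, 0 ≤ i → i < L →
        min (i + 1) (L - i) ≤ (PySem.List.pyGet? stones (i + off)).getD 0 := by
  simp [pvFitsB, List.all_eq_true, PySem.List.mem_pyRange_one]

lemma sum_asc : ∀ m : Nat, (((List.range m).map (fun j : Nat => (1 : Int) + (j : Int))).sum) * 2 = (m : Int) * ((m : Int) + 1) := by
  intro m
  induction m with
  | zero => simp
  | succ m ih =>
    rw [List.range_succ, List.map_append, List.sum_append]
    simp only [List.map_cons, List.map_nil, List.sum_cons, List.sum_nil]
    push_cast
    linear_combination ih

lemma loopA_exit (stones : List Int) (fuel : Nat) (L m : Int) (f : List Int) (h : m ≠ -1) :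
    pvLoopA stones fuel L m f = (m, f) := by
  cases fuel with
  | zero => rfl
  | succ fuel =>
    rw [pvLoopA]
    simp [h]

lemma pyrA_eq (k : Int) (hk : 1 ≤ k) :
    pvPyrA (2 * k - 1) =
      (PySem.List.pyRange 0 (2 * k - 1) 1).map (fun i => min (i + 1) (2 * k - 1 - i)) := by
  have hfd : PySem.Int.floordiv (2 * k - 1) 2 = k - 1 := by
    rw [PySem.Int.floordiv_eq_iff_of_pos (by omega)]
    constructor <;> omega
  unfold pvPyrA
  rw [hfd, show k - 1 + 1 = k from by ring]
  apply List.ext_getElem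
  · simp [PySem.List.length_pyRange_one, PySem.List.pyRange_neg_one]
    omega
  · intro j hj1 hj2
    rw [List.getElem_append]
    simp only [PySem.List.pyRange_one, PySem.List.pyRange_neg_one, List.getElem_map,
      List.getElem_range, List.length_map, List.length_range]
    simp only [PySem.List.length_pyRange_one, List.length_map, List.length_range] at hj2
    split
    · omega
    · omega

lemma fits_left_mono (stones : List Int) (L L' : Int) (_h1 : 1 ≤ L') (h2 : L' ≤ L)
    (h : pvFitsB stones L 0 = true) : pvFitsB stones L' 0 = true := by
  rw [fitsB_iff] at h ⊢
  intro i h0 hiL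
  have := h i h0 (by omega)
  omega

lemma fits_right_mono (stones : List Int) (L L' : Int) (_h1 : 1 ≤ L') (h2 : L' ≤ L)
    (h : pvFitsB stones L ((stones.length : Int) - L) = true) :
    pvFitsB stones L' ((stones.length : Int) - L') = true := by
  rw [fitsB_iff] at h ⊢
  intro i h0 hiL
  have hh := h (i + (L - L')) (by omega) (by omega)
  rw [show i + (L - L') + ((stones.length : Int) - L) = i + ((stones.length : Int) - L') from by ring] at hh
  omega

lemma feas_mono (stones : List Int) (left : Bool) (a b : Int) (ha : 1 ≤ a) (hab : a ≤ b)
    (h : pvFeas stones left b = true) : pvFeas stones left a = true := by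
  cases left
  · simp only [pvFeas, if_neg Bool.false_ne_true] at h ⊢
    exact fits_right_mono stones (2 * b - 1) (2 * a - 1) (by omega) (by omega) h
  · simp only [pvFeas] at h ⊢
    exact fits_left_mono stones (2 * b - 1) (2 * a - 1) (by omega) (by omega) h

lemma pyr_sum (k : Int) (hk : 1 ≤ k) : (pvPyrA (2 * k - 1)).sum = k * k := by
  have hfd : PySem.Int.floordiv (2 * k - 1) 2 = k - 1 := by
    rw [PySem.Int.floordiv_eq_iff_of_pos (by omega)]
    constructor <;> omega
  unfold pvPyrA
  rw [hfd, show k - 1 + 1 = k from by ring, List.sum_append,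
    PySem.List.pyRange_neg_one_eq_reverse, List.sum_reverse,
    PySem.List.pyRange_one 1 k]
  have hrw : PySem.List.pyRange (0 + 1) (k + 1) 1 =
      List.map (fun j : Nat => (1 : Int) + (j : Int)) (List.range k.toNat) := by
    rw [PySem.List.pyRange_one]
    norm_num
  rw [hrw]
  have h1 := sum_asc (k - 1).toNat
  have h2 := sum_asc k.toNat
  have e1 : (((k - 1).toNat : Int)) = k - 1 := by omega
  have e2 : ((k.toNat : Int)) = k := by omega
  rw [e1] at h1
  rw [e2] at h2
  ring_nf at h1 h2 ⊢
  linarith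

lemma maxK_spec (stones : List Int) (left : Bool)
    (Mono : ∀ a b : Int, 1 ≤ a → a ≤ b → pvFeas stones left b = true → pvFeas stones left a = true) :
    ∀ (fuel : Nat) (lo hi : Int), 0 ≤ lo → lo ≤ hi → (hi - lo).toNat < fuel →
      (lo = 0 ∨ pvFeas stones left lo = true) →
      lo ≤ pvMaxK stones left fuel lo hi ∧ pvMaxK stones left fuel lo hi ≤ hi ∧
      (pvMaxK stones left fuel lo hi = 0 ∨ pvFeas stones left (pvMaxK stones left fuel lo hi) = true) ∧
      (∀ j, pvMaxK stones left fuel lo hi < j → j ≤ hi → pvFeas stones left j = false) := by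
  intro fuel
  induction fuel with
  | zero => intro lo hi _ _ hcon; omega
  | succ fuel ih =>
    intro lo hi hlo0 hlohi hfuel hfeaslo
    rw [pvMaxK]
    by_cases hlt : lo < hi
    · rw [if_pos hlt]
      have hmid := PySem.Int.floordiv_two_mid_bounds (show lo + 1 ≤ hi by omega)
      rw [show lo + 1 + hi = lo + hi + 1 from by ring] at hmid
      set mid := PySem.Int.floordiv (lo + hi + 1) 2 with hmiddef
      by_cases hfit : pvFitsB stones (2 * mid - 1)
          (if left then 0 else (stones.length : Int) - (2 * mid - 1)) = true
      · simp only [hfit, if_true]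
        have hfeasmid : pvFeas stones left mid = true := hfit
        have hrec := ih mid hi (by omega) (by omega) (by omega) (Or.inr hfeasmid)
        exact ⟨by omega, hrec.2.1, hrec.2.2.1, hrec.2.2.2⟩
      · rw [if_neg (by simpa using hfit)]
        have hrec := ih lo (mid - 1) hlo0 (by omega) (by omega) hfeaslo
        refine ⟨hrec.1, by omega, hrec.2.2.1, ?_⟩
        intro j hj1 hj2
        by_cases hjm : j ≤ mid - 1
        · exact hrec.2.2.2 j hj1 hjm
        · -- mid ≤ j : infeasible by monotonicity from hfit
          by_contra hc
          have : pvFeas stones left j = true := by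
            cases hfj : pvFeas stones left j
            · exact absurd hfj hc
            · rfl
          have := Mono mid j (by omega) (by omega) this
          exact hfit this
    · rw [if_neg hlt]
      exact ⟨le_refl _, by omega, by
        rcases hfeaslo with h | h
        · exact Or.inl h
        · exact Or.inr h, by intro j h1 h2; omega⟩

lemma validA_aux (stones : List Int) (pyr : List Int) :
    ∀ (s off : Int),
      (((PySem.List.enumerate pyr s).all
          (fun p => !(decide ((PySem.List.pyGet? stones (p.1 + off)).getD 0 < p.2)))) = true) ↔
        ∀ j : Nat, (h : j < pyr.length) →
          pyr[j] ≤ (PySem.List.pyGet? stones (s + j + off)).getD 0 := by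
  induction pyr with
  | nil => intro s off; simp [PySem.List.enumerate_nil]
  | cons x t ih =>
    intro s off
    rw [PySem.List.enumerate_cons, List.all_cons, Bool.and_eq_true, ih (s + 1) off]
    constructor
    · rintro ⟨hx, ht⟩ j hj
      cases j with
      | zero =>
        simp only [List.getElem_cons_zero]
        simp only [Bool.not_eq_eq_eq_not, Bool.not_true, decide_eq_false_iff_not, not_lt] at hx
        simpa using hx
      | succ j =>
        have hh := ht j (by simpa using hj)
        simp only [List.getElem_cons_succ]
        rw [show (s : Int) + (↑(j + 1) : Int) + off = (s + 1) + (j : Int) + off from by push_cast; ring]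
        exact hh
    · intro hall
      constructor
      · have hh := hall 0 (by simp)
        simp only [List.getElem_cons_zero] at hh
        simp only [Bool.not_eq_eq_eq_not, Bool.not_true, decide_eq_false_iff_not, not_lt]
        simpa using hh
      · intro j hj
        have hh := hall (j + 1) (by simpa using hj)
        simp only [List.getElem_cons_succ] at hh
        rw [show (s + 1) + (j : Int) + off = (s : Int) + (↑(j + 1) : Int) + off from by push_cast; ring]
        exact hh

lemma validA_eq_fitsB (stones : List Int) (k off : Int) (hk : 1 ≤ k) :
    pvValidA stones (pvPyrA (2 * k - 1)) off = pvFitsB stones (2 * k - 1) off := by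
  have hlen : (pvPyrA (2 * k - 1)).length = (2 * k - 1).toNat := by
    rw [pyrA_eq k hk]
    simp [PySem.List.length_pyRange_one]
  rw [Bool.eq_iff_iff]
  unfold pvValidA
  rw [validA_aux stones (pvPyrA (2 * k - 1)) 0 off, fitsB_iff]
  constructor
  · intro h i h0 hiL
    have hj : i.toNat < (pvPyrA (2 * k - 1)).length := by rw [hlen]; omega
    have hh := h i.toNat hj
    simp only [pyrA_eq k hk] at hh
    simp only [List.getElem_map, PySem.List.getElem_pyRange_one] at hh
    rw [Int.toNat_of_nonneg h0] at hh
    simpa using hh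
  · intro h j hj
    simp only [pyrA_eq k hk]
    simp only [List.getElem_map, PySem.List.getElem_pyRange_one]
    rw [hlen] at hj
    have hh := h j (by omega) (by omega)
    simpa using hh

lemma pyGetD_nonneg (stones : List Int) (hpre : ∀ x ∈ stones, 0 ≤ x) (j : Int) :
    0 ≤ PySem.List.pyGetD stones j 0 := by
  unfold PySem.List.pyGetD
  cases hg : PySem.List.pyGet? stones j with
  | none => simp
  | some v =>
    simp only [Option.getD_some]
    exact hpre v (PySem.List.mem_of_pyGet?_eq_some stones hg)

lemma window_sum (stones : List Int) (k off : Int) (hpre : ∀ x ∈ stones, 0 ≤ x)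
    (hk : 1 ≤ k) (hoff : 0 ≤ off) (hLn : off + (2 * k - 1) ≤ (stones.length : Int))
    (hfits : pvFitsB stones (2 * k - 1) off = true) : k * k ≤ stones.sum := by
  have hn0 : (0 : Int) ≤ (stones.length : Int) := by positivity
  set n : Int := (stones.length : Int) with hn
  set L : Int := 2 * k - 1 with hLdef
  have h1 : PySem.List.pyRange 0 n 1 =
      PySem.List.pyRange 0 off 1 ++ PySem.List.pyRange off n 1 :=
    PySem.List.pyRange_one_append 0 off n hoff (by omega)
  have h2 : PySem.List.pyRange off n 1 =
      PySem.List.pyRange off (off + L) 1 ++ PySem.List.pyRange (off + L) n 1 :=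
    PySem.List.pyRange_one_append off (off + L) n (by omega) (by omega)
  have hfull : ((PySem.List.pyRange 0 n 1).map (fun j => PySem.List.pyGetD stones j 0)).sum
      = stones.sum := by
    rw [PySem.List.map_pyGetD_pyRange_zero' stones 0]
  rw [h1, h2, List.map_append, List.map_append, List.sum_append, List.sum_append] at hfull
  have hs0 : 0 ≤ ((PySem.List.pyRange 0 off 1).map (fun j => PySem.List.pyGetD stones j 0)).sum := by
    apply List.sum_nonneg
    intro x hx
    rcases List.mem_map.mp hx with ⟨j, _, rfl⟩
    exact pyGetD_nonneg stones hpre j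
  have hs2 : 0 ≤ ((PySem.List.pyRange (off + L) n 1).map (fun j => PySem.List.pyGetD stones j 0)).sum := by
    apply List.sum_nonneg
    intro x hx
    rcases List.mem_map.mp hx with ⟨j, _, rfl⟩
    exact pyGetD_nonneg stones hpre j
  suffices hmid : k * k ≤ ((PySem.List.pyRange off (off + L) 1).map (fun j => PySem.List.pyGetD stones j 0)).sum by linarith
  · 
    have hpyr : ((PySem.List.pyRange 0 L 1).map (fun i => min (i + 1) (L - i))).sum = k * k := by
      rw [hLdef, ← pyrA_eq k hk]
      exact pyr_sum k hk
    rw [← hpyr]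
    rw [PySem.List.pyRange_one off (off + L), PySem.List.pyRange_one 0 L, List.map_map, List.map_map,
      show off + L - off = L from by ring, show L - 0 = L from by ring]
    apply List.sum_le_sum
    intro j hj
    simp only [Function.comp_apply]
    have hjL : (j : Int) < L := by
      have := List.mem_range.mp hj
      omega
    have hh := (fitsB_iff stones L off).mp hfits (j : Int) (by positivity) hjL
    simp only [zero_add]
    rw [show off + (j : Int) = (j : Int) + off from by ring]
    unfold PySem.List.pyGetD
    omega

lemma loopA_descend (stones : List Int) (kstar K : Int) (f : List Int)
    (h0 : 0 ≤ kstar) (_hK : kstar ≤ K)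
    (hfail : ∀ j, kstar < j → j ≤ K →
      pvFeas stones true j = false ∧ pvFeas stones false j = false) :
    ∀ (d fuel : Nat) (m : Int), kstar ≤ m → m ≤ K → (m - kstar).toNat = d → d ≤ fuel →
      pvLoopA stones fuel (2 * m - 1) (-1) f = pvLoopA stones (fuel - d) (2 * kstar - 1) (-1) f := by
  intro d
  induction d with
  | zero =>
    intro fuel m h1 h2 hd _
    have : m = kstar := by omega
    rw [this, Nat.sub_zero]
  | succ d ih =>
    intro fuel m h1 h2 hd hdf
    obtain ⟨g, rfl⟩ : ∃ g, fuel = g + 1 := ⟨fuel - 1, by omega⟩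
    have hfl := hfail m (by omega) h2
    have hvl : pvValidA stones (pvPyrA (2 * m - 1)) 0 = false := by
      rw [validA_eq_fitsB stones m 0 (by omega)]
      simpa [pvFeas] using hfl.1
    have hvr : pvValidA stones (pvPyrA (2 * m - 1)) ((stones.length : Int) - (2 * m - 1)) = false := by
      rw [validA_eq_fitsB stones m _ (by omega)]
      simpa [pvFeas] using hfl.2
    rw [pvLoopA, if_pos ⟨by omega, rfl⟩]
    simp only [hvl, hvr, Bool.false_eq_true, if_false]
    rw [show 2 * m - 1 - 2 = 2 * (m - 1) - 1 from by ring,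
      show g + 1 - (d + 1) = g - d from by omega]
    exact ih g (m - 1) (by omega) (by omega) (by omega) (by omega)

lemma createPyramid_eq : ∀ (stones : List Int), Dom_createPyramid stones → Pre_createPyramid stones → createPyramid stones = createPyramid_alt stones := by
  intro stones _hdom hpre
  simp only [createPyramid, createPyramid_alt]
  set n : Int := (stones.length : Int) with hn
  have hn0 : 0 ≤ n := by positivity
  set K : Int := PySem.Int.floordiv (n + 1) 2 with hKdef
  have hKb : K * 2 ≤ n + 1 ∧ n + 1 < (K + 1) * 2 :=
    (PySem.Int.floordiv_eq_iff_of_pos (by omega)).mp rfl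
  have hmodeq := PySem.Int.floordiv_mul_add_mod n 2
  have hmodnn := PySem.Int.mod_nonneg n (show (0:Int) < 2 by omega)
  have hmodlt := PySem.Int.mod_lt n (show (0:Int) < 2 by omega)
  have hL0 : (if PySem.Int.mod n 2 = 0 then n - 1 else n) = 2 * K - 1 := by
    split_ifs with hmz
    · omega
    · omega
  rw [hL0]
  set kl := pvMaxK stones true (stones.length + 1) 0 K with hkl_def
  set kr := pvMaxK stones false (stones.length + 1) 0 K with hkr_def
  have hkl := maxK_spec stones true (feas_mono stones true) (stones.length + 1) 0 K
    (le_refl 0) (by omega) (by omega) (Or.inl rfl)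
  have hkr := maxK_spec stones false (feas_mono stones false) (stones.length + 1) 0 K
    (le_refl 0) (by omega) (by omega) (Or.inl rfl)
  rw [← hkl_def] at hkl
  rw [← hkr_def] at hkr
  set ks : Int := max kl kr with hksdef
  have hks0 : 0 ≤ ks := by omega
  have hksK : ks ≤ K := by omega
  have hfail : ∀ j, ks < j → j ≤ K →
      pvFeas stones true j = false ∧ pvFeas stones false j = false := by
    intro j hj1 hj2
    exact ⟨hkl.2.2.2 j (by omega) hj2, hkr.2.2.2 j (by omega) hj2⟩
  rw [loopA_descend stones ks K (List.replicate stones.length 0) hks0 hksK hfail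
    (K - ks).toNat (stones.length + 1) K hksK (le_refl K) rfl (by omega)]
  obtain ⟨g, hg⟩ : ∃ g, stones.length + 1 - (K - ks).toNat = g + 1 :=
    ⟨stones.length - (K - ks).toNat, by omega⟩
  rw [hg]
  by_cases hz : ks = 0
  · rw [pvLoopA, if_neg (show ¬(0 < 2 * ks - 1 ∧ (-1 : Int) = -1) from by omega), if_pos hz]
  · have hks1 : 1 ≤ ks := by omega
    have hmax0 : ¬ (max kl kr = 0) := by omega
    rw [if_neg hmax0]
    rw [pvLoopA, if_pos ⟨by omega, rfl⟩]
    rw [← hn]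
    have hLn : 2 * ks - 1 ≤ n := by omega
    by_cases hlr : kr ≤ kl
    · have hklks : kl = ks := by omega
      have hfeasL : pvFeas stones true ks = true := by
        rcases hkl.2.2.1 with h | h
        · omega
        · rw [hklks] at h; exact h
      have hfitL : pvFitsB stones (2 * ks - 1) 0 = true := by
        simpa [pvFeas] using hfeasL
      have hvalid : pvValidA stones (pvPyrA (2 * ks - 1)) 0 = true := by
        rw [validA_eq_fitsB stones ks 0 hks1]; exact hfitL
      simp only [hvalid, if_true]
      rw [pyr_sum ks hks1]
      have hwin := window_sum stones ks 0 hpre hks1 (le_refl 0) (by omega) hfitL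
      rw [loopA_exit stones g _ _ _ (by intro hc; linarith)]
      rw [if_pos hlr]
      unfold pvFinalA
      rw [pyrA_eq ks hks1]
    · have hkrks : kr = ks := by omega
      have hfeasR : pvFeas stones false ks = true := by
        rcases hkr.2.2.1 with h | h
        · omega
        · rw [hkrks] at h; exact h
      have hfitR : pvFitsB stones (2 * ks - 1) (n - (2 * ks - 1)) = true := by
        simpa [pvFeas] using hfeasR
      have hnotL : pvFeas stones true ks = false := hkl.2.2.2 ks (by omega) hksK
      have hvl : pvValidA stones (pvPyrA (2 * ks - 1)) 0 = false := by
        rw [validA_eq_fitsB stones ks 0 hks1]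
        simpa [pvFeas] using hnotL
      have hvr : pvValidA stones (pvPyrA (2 * ks - 1)) (n - (2 * ks - 1)) = true := by
        rw [validA_eq_fitsB stones ks _ hks1]; exact hfitR
      simp only [hvl, hvr, Bool.false_eq_true, if_false, if_true]
      rw [pyr_sum ks hks1]
      have hwin := window_sum stones ks (n - (2 * ks - 1)) hpre hks1 (by omega) (by omega) hfitR
      rw [loopA_exit stones g _ _ _ (by intro hc; linarith)]
      rw [if_neg hlr]
      unfold pvFinalA
      rw [pyrA_eq ks hks1]

-- ===== VERDICT (by name: the statement is the Claim_ definition above) =====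
theorem createPyramid_spec : Claim_equal_createPyramid := by
  intro stones hdom hpre
  unfold Spec_createPyramid
  exact createPyramid_eq stones hdom hpre
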